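-- pv_equiv track=rewrite | github.com/IlyaGerasimov/task4_code_standard_replacement | gen.py | get_g
-- ===== SOURCE A (Python) =====
-- def get_g(g_0, k, n):
--     g = [False for j in range(n)]
--     i = 0
--     while i < k:
--         g[i] = [(j == i) for j in range(k)]
--         i += 1
--     while i < n:
--         g[i] = [g_0[j][i - k] for j in range(k)]
--         i += 1
--     return g
-- ===== SOURCE B (Python) =====
-- def get_g(g_0, k, n):
--     identity = [[j == i for j in range(k)] for i in range(k)]
--     m = len(identity)
--     bottom = [[] for _ in range(n - m)]
--     for row in g_0[:m]:
--         for i, x in enumerate(row[:n - m]):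
--             bottom[i].append(x)
--     return identity + bottom
-- ===== Notes on version B (the rewrite author's own statement) =====
-- stated objective: alternative
-- what changed: B builds the identity block and the bottom block as two separate lists and concatenates them, filling the bottom block by a row-major transpose of g_0 (distributing each g_0 row across per-column accumulators) instead of preallocating one list and overwriting it with two index-counting while loops that read g_0 column-major.
import Mathlib
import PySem

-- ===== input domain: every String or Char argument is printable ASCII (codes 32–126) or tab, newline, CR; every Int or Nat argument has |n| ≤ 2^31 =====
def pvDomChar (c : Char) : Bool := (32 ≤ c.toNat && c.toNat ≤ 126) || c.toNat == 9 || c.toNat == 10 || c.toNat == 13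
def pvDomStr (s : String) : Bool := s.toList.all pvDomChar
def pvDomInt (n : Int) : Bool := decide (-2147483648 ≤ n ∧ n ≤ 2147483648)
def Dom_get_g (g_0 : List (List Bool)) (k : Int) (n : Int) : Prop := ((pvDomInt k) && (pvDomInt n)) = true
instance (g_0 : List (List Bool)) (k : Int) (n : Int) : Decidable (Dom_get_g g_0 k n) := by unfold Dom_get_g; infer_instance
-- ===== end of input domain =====

-- B builds the identity block and the transposed-g_0 block separately and concatenates them,
-- instead of overwriting a preallocated list with two index-counting while loops (alternative decomposition, same cost).


-- ===== PORT A =====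
-- row [(j == i) for j in range(k)]
def get_g_identRow (k i : Int) : List Bool :=
  (PySem.List.pyRange 0 k 1).map (fun j => decide (j = i))

-- row [g_0[j][i - k] for j in range(k)]  (indexing total via pyGetD; Pre_ keeps it in range)
def get_g_codeRow (g_0 : List (List Bool)) (k i : Int) : List Bool :=
  (PySem.List.pyRange 0 k 1).map (fun j =>
    PySem.List.pyGetD (PySem.List.pyGetD g_0 j []) (i - k) false)

-- first while loop: while i < k: g[i] = identRow; i += 1  (returns g and the exit value of i)
def get_g_loop1 (g : List (List Bool)) (k i : Int) : List (List Bool) × Int :=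
  if i < k then
    get_g_loop1 (PySem.List.pySetD g i (get_g_identRow k i)) k (i + 1)
  else (g, i)
termination_by (k - i).toNat
decreasing_by omega

-- second while loop: while i < n: g[i] = codeRow; i += 1
def get_g_loop2 (g_0 : List (List Bool)) (g : List (List Bool)) (k n i : Int) : List (List Bool) :=
  if i < n then
    get_g_loop2 g_0 (PySem.List.pySetD g i (get_g_codeRow g_0 k i)) k n (i + 1)
  else g
termination_by (n - i).toNat
decreasing_by omega

-- g = [False for j in range(n)]: the placeholder rows [] stand for the initial False entries,
-- every entry returned under Pre_ is overwritten before being read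
def get_g (g_0 : List (List Bool)) (k : Int) (n : Int) : List (List Bool) :=
  let g : List (List Bool) := (PySem.List.pyRange 0 n 1).map (fun _ => [])
  let r := get_g_loop1 g k 0
  get_g_loop2 g_0 r.1 k n r.2

-- ===== PORT B =====
def get_g_alt (g_0 : List (List Bool)) (k : Int) (n : Int) : List (List Bool) :=
  let identity := (PySem.List.pyRange 0 k 1).map (fun i =>
    (PySem.List.pyRange 0 k 1).map (fun j => decide (j = i)))
  let m := PySem.List.len identity
  let bottom0 : List (List Bool) := (PySem.List.pyRange 0 (n - m) 1).map (fun _ => [])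
  let bottom := (PySem.List.slice g_0 none (some m)).foldl
    (fun b row =>
      (PySem.List.enumerate (PySem.List.slice row none (some (n - m))) 0).foldl
        (fun b p => PySem.List.pySetD b p.1 (PySem.List.pyGetD b p.1 [] ++ [p.2])) b)
    bottom0
  identity ++ bottom

-- ===== PRECONDITION & SPEC =====
-- Pre_ excludes exactly the inputs where A raises IndexError: 0 < k with k > n,
-- or (when the second loop runs, i.e. k < n) g_0 lacking k rows of length ≥ n - k.
def Pre_get_g (g_0 : List (List Bool)) (k : Int) (n : Int) : Prop :=
  0 < k → k ≤ n ∧ (k < n → k ≤ (g_0.length : Int) ∧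
    ∀ row ∈ g_0.take k.toNat, n - k ≤ (row.length : Int))
instance (g_0 : List (List Bool)) (k : Int) (n : Int) : Decidable (Pre_get_g g_0 k n) := by
  unfold Pre_get_g; infer_instance

def pvWitness_get_g : List (List Bool) × Int × Int := ([[true, false], [false, true]], 2, 4)

def Spec_get_g (g_0 : List (List Bool)) (k : Int) (n : Int) (out : List (List Bool)) : Prop := out = get_g_alt g_0 k n
instance (g_0 : List (List Bool)) (k : Int) (n : Int) (out : List (List Bool)) : Decidable (Spec_get_g g_0 k n out) := by unfold Spec_get_g; infer_instance

-- ===== CLAIM (what is proved, stated in full; the proofs are below) =====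
def Claim_equal_get_g : Prop := ∀ (g_0 : List (List Bool)) (k : Int) (n : Int), Dom_get_g g_0 k n → Pre_get_g g_0 k n → Spec_get_g g_0 k n (get_g g_0 k n)

-- ===== LEMMAS AND PROOFS =====

theorem take_succ_set (g : List (List Bool)) (t : Nat) (v : List Bool) (h : t < g.length) :
    (g.set t v).take (t+1) = g.take t ++ [v] := by
  rw [List.take_add_one, List.take_set, List.getElem?_set_self']
  rw [List.set_eq_of_length_le (by simp [Nat.le_of_lt h])]
  simp [List.getElem?_eq_getElem h]

lemma get_g_loop1_spec (k : Int) : ∀ (m : Nat) (i : Int) (g : List (List Bool)),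
    (k - i).toNat = m → 0 ≤ i → i ≤ k → k.toNat ≤ g.length →
    get_g_loop1 g k i =
      (g.take i.toNat ++ (PySem.List.pyRange i k 1).map (get_g_identRow k) ++ g.drop k.toNat, k) := by
  intro m
  induction m with
  | zero =>
    intro i g hm h0 hik hlen
    have : i = k := by omega
    subst this
    rw [get_g_loop1]
    simp [PySem.List.pyRange_one_eq_nil le_rfl, List.take_append_drop]
  | succ m ih =>
    intro i g hm h0 hik hlen
    have hlt : i < k := by omega
    rw [get_g_loop1, if_pos hlt]
    rw [ih (i+1) _ (by omega) (by omega) (by omega) (by simp [PySem.List.length_pySetD]; omega)]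
    rw [PySem.List.pySetD_of_nonneg g _ h0]
    have ht : i.toNat < g.length := by omega
    rw [PySem.List.pyRange_one_cons hlt, List.map_cons]
    have h1 : (i+1).toNat = i.toNat + 1 := by omega
    rw [h1, take_succ_set g i.toNat _ ht, List.drop_set_of_lt (by omega)]
    simp

lemma get_g_loop2_spec (g_0 : List (List Bool)) (k n : Int) : ∀ (m : Nat) (i : Int) (g : List (List Bool)),
    (n - i).toNat = m → 0 ≤ i → i ≤ n → g.length = n.toNat →
    get_g_loop2 g_0 g k n i =
      g.take i.toNat ++ (PySem.List.pyRange i n 1).map (get_g_codeRow g_0 k) := by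
  intro m
  induction m with
  | zero =>
    intro i g hm h0 hik hlen
    have : i = n := by omega
    subst this
    rw [get_g_loop2]
    simp [PySem.List.pyRange_one_eq_nil le_rfl, List.take_of_length_le (le_of_eq hlen)]
  | succ m ih =>
    intro i g hm h0 hik hlen
    have hlt : i < n := by omega
    rw [get_g_loop2, if_pos hlt]
    rw [ih (i+1) _ (by omega) (by omega) (by omega) (by simp [PySem.List.length_pySetD]; omega)]
    rw [PySem.List.pySetD_of_nonneg g _ h0]
    have ht : i.toNat < g.length := by omega
    rw [PySem.List.pyRange_one_cons hlt, List.map_cons]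
    have h1 : (i+1).toNat = i.toNat + 1 := by omega
    rw [h1, take_succ_set g i.toNat _ ht]
    simp

lemma get_g_inner_fold (r : List Bool) : ∀ (pre b : List (List Bool)), r.length = b.length →
    (PySem.List.enumerate r (pre.length : Int)).foldl
      (fun b p => PySem.List.pySetD b p.1 (PySem.List.pyGetD b p.1 [] ++ [p.2])) (pre ++ b)
    = pre ++ List.zipWith (fun c x => c ++ [x]) b r := by
  induction r with
  | nil =>
    intro pre b h
    have : b = [] := List.eq_nil_of_length_eq_zero (by simpa using h.symm)
    simp [this, PySem.List.enumerate]
  | cons x r ihr =>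
    intro pre b h
    cases b with
    | nil => simp at h
    | cons c b' =>
      rw [PySem.List.enumerate_cons, List.foldl_cons]
      have hget : PySem.List.pyGetD (pre ++ c :: b') (pre.length : Int) [] = c := by
        simp [PySem.List.pyGetD]
      have hset : PySem.List.pySetD (pre ++ c :: b') (pre.length : Int) (c ++ [x])
          = (pre ++ [c ++ [x]]) ++ b' := by
        rw [PySem.List.pySetD_of_nonneg _ _ (by positivity)]
        simp [List.set_append_right]
      rw [hget, hset]
      have h' : r.length = b'.length := by simp at h; omega
      have := ihr (pre ++ [c ++ [x]]) b' h'
      simp only [List.length_append, List.length_cons, List.length_nil] at this ⊢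
      rw [show ((pre.length : Int) + 1) = ((pre.length + 1 : Nat) : Int) by push_cast; ring]
      simpa using this

lemma get_g_outer_fold (M : Nat) : ∀ (rows : List (List Bool)) (b : List (List Bool)),
    b.length = M → (∀ r ∈ rows, M ≤ r.length) →
    rows.foldl
      (fun b row =>
        (PySem.List.enumerate (PySem.List.slice row none (some (M : Int))) 0).foldl
          (fun b p => PySem.List.pySetD b p.1 (PySem.List.pyGetD b p.1 [] ++ [p.2])) b) b
    = (List.range M).map (fun i => b.getD i [] ++ rows.map (fun r => r.getD i false)) := by
  intro rows
  induction rows with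
  | nil =>
    intro b hb _
    subst hb
    apply List.ext_getElem (by simp)
    intro i h1 h2
    have hib : i < b.length := by simpa using h2
    simp [List.getElem?_eq_getElem hib]
  | cons r rows ihr =>
    intro b hb hr
    rw [List.foldl_cons]
    have hM : M ≤ r.length := hr r (by simp)
    have hslice : PySem.List.slice r none (some (M : Int)) = r.take M := by
      rw [PySem.List.slice_to _ (by positivity)]; simp
    have htl : (r.take M).length = b.length := by simp [hb]; omega
    have hin : List.foldl (fun b p => PySem.List.pySetD b p.1 (PySem.List.pyGetD b p.1 [] ++ [p.2])) b
        (PySem.List.enumerate (r.take M) 0) = List.zipWith (fun c x => c ++ [x]) b (r.take M) := by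
      simpa using get_g_inner_fold (r.take M) [] b htl
    rw [hslice, hin]
    rw [ihr _ (by simp [hb]; omega) (fun s hs => hr s (by simp [hs]))]
    apply List.map_congr_left
    intro i hi
    have hiM : i < M := by simpa using hi
    have h1 : i < (List.zipWith (fun c x => c ++ [x]) b (r.take M)).length := by simp [hb]; omega
    rw [List.getD_eq_getElem _ _ h1, List.getElem_zipWith,
        List.getD_eq_getElem _ _ (by omega), List.getElem_take]
    simp [List.getElem?_eq_getElem (show i < r.length by omega)]

theorem main (g_0 : List (List Bool)) (k n : Int) (hpre : Pre_get_g g_0 k n) :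
    get_g g_0 k n = get_g_alt g_0 k n := by
  by_cases hkpos : 0 < k
  · -- k > 0: identity block of k rows, then the transposed block
    obtain ⟨hkn, hrest⟩ := hpre hkpos
    have hk0 : 0 ≤ k := le_of_lt hkpos
    have hn : 0 ≤ n := by omega
    have hklen : k < n → k.toNat ≤ g_0.length := fun h => by have := (hrest h).1; omega
    have hrows : ∀ row ∈ g_0.take k.toNat, n - k ≤ (row.length : Int) := by
      by_cases h : k < n
      · exact (hrest h).2
      · intro row _; omega
    -- A side
    rw [get_g]
    rw [get_g_loop1_spec k ((k - 0).toNat) 0 _ rfl le_rfl hk0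
        (by simp [PySem.List.length_pyRange_one]; omega)]
    rw [get_g_loop2_spec g_0 k n ((n - k).toNat) k _ rfl hk0 hkn
        (by simp [PySem.List.length_pyRange_one]; omega)]
    simp only [Int.toNat_zero, List.take_zero, List.nil_append]
    rw [List.take_left' (by simp [PySem.List.length_pyRange_one])]
    -- B side
    simp only [get_g_alt]
    have hm : PySem.List.len ((PySem.List.pyRange 0 k 1).map (fun i =>
        (PySem.List.pyRange 0 k 1).map (fun j => decide (j = i)))) = k := by
      simp [PySem.List.len_eq, PySem.List.length_pyRange_one]; omega
    rw [hm]
    have hMcast : n - k = (((n - k).toNat : Nat) : Int) := by omega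
    rw [hMcast, PySem.List.slice_to _ hk0]
    have hb0 : ((PySem.List.pyRange 0 (((n - k).toNat : Nat) : Int) 1).map
        (fun _ => ([] : List Bool))) = List.replicate (n - k).toNat [] := by
      refine List.eq_replicate_iff.mpr ⟨by simp [PySem.List.length_pyRange_one]; omega, ?_⟩
      intro x hx
      rcases List.mem_map.1 hx with ⟨a, _, h⟩
      exact h.symm
    rw [hb0]
    rw [get_g_outer_fold (n - k).toNat (g_0.take k.toNat) (List.replicate (n - k).toNat []) (by simp)
        (fun r hr => by have := hrows r hr; omega)]
    congr 1
    -- the identity blocks are closed by congr; the bottom block remains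
    rw [PySem.List.pyRange_one k n]
    rw [List.map_map]
    apply List.map_congr_left
    intro t ht
    have htM : t < (n - k).toNat := List.mem_range.1 ht
    have hklen2 : k.toNat ≤ g_0.length := hklen (by omega)
    rw [Function.comp_apply, get_g_codeRow]
    have harg : k + (t : Int) - k = ((t : Nat) : Int) := by omega
    rw [harg]
    have hrep : (List.replicate (n - k).toNat ([] : List Bool)).getD t [] = [] := by
      rw [List.getD_eq_getElem _ _ (by simpa using htM)]
      simp
    rw [hrep, List.nil_append]
    rw [PySem.List.pyRange_one 0 k, List.map_map]
    apply List.ext_getElem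
    · simp; omega
    · intro j h1 h2
      have hjK : j < k.toNat := by simp at h1; omega
      simp only [List.getElem_map, List.getElem_range, Function.comp_apply, List.getElem_take]
      simp only [zero_add, PySem.List.pyGetD_natCast]
      rw [List.getD_eq_getElem _ _ (show j < g_0.length by omega)]
  · -- k ≤ 0: the identity block is empty and every produced row is []
    have hident : PySem.List.pyRange 0 k 1 = [] :=
      PySem.List.pyRange_one_eq_nil (by omega)
    simp only [get_g, get_g_alt, hident, List.map_nil, List.nil_append,
      PySem.List.len_eq, List.length_nil, Nat.cast_zero, Int.sub_zero]
    rw [get_g_loop1, if_neg (by omega)]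
    rw [PySem.List.slice_to _ le_rfl]
    simp only [Int.toNat_zero, List.take_zero, List.foldl_nil]
    by_cases hn : 0 ≤ n
    · rw [get_g_loop2_spec g_0 k n ((n - 0).toNat) 0 _ rfl le_rfl hn
          (by simp [PySem.List.length_pyRange_one])]
      simp only [Int.toNat_zero, List.take_zero, List.nil_append]
      apply List.map_congr_left
      intro t _
      rw [get_g_codeRow, hident, List.map_nil]
    · rw [PySem.List.pyRange_one_eq_nil (show n ≤ 0 by omega), List.map_nil]
      rw [get_g_loop2, if_neg (by omega)]

-- ===== VERDICT (by name: the statement is the Claim_ definition above) =====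
theorem get_g_spec : Claim_equal_get_g := by
  intro g_0 k n _ hpre
  unfold Spec_get_g
  exact main g_0 k n hpre
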